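-- pv_equiv track=rewrite | github.com/chaoyuan-guo/second-brain | backend/app/services/chat.py | _extract_candidate_lines
-- ===== SOURCE A (Python) =====
-- from typing import Any, Callable, Dict, List, Optional
--
-- def _extract_candidate_lines(content: str, phrases: List[str]) -> List[str]:
--     if not content or not phrases:
--         return []
--     candidates: List[str] = []
--     for line in content.splitlines():
--         stripped = line.strip()
--         if not stripped:
--             continue
--         if any(phrase in stripped for phrase in phrases):
--             candidates.append(stripped)
--     return candidates
-- ===== SOURCE B (Python) =====
-- from typing import List
--
-- def _extract_candidate_lines(content: str, phrases: List[str]) -> List[str]: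
--     # Strip each line once, then mark matching line indices phrase by phrase,
--     # and finally emit the non-empty hit lines in their original order.
--     lines = [line.strip() for line in content.splitlines()]
--     hits = set()
--     for phrase in phrases:
--         for i, line in enumerate(lines):
--             if phrase in line:
--                 hits.add(i)
--     return [line for i, line in enumerate(lines) if line and i in hits]
-- ===== Notes on version B (the rewrite author's own statement) =====
-- stated objective: alternative
-- what changed: B inverts the loop nesting: instead of A's per-line any-phrase scan with an append accumulator, B strips all lines once, runs a phrase-outer pass marking matching line indices in a set, and then emits the non-empty marked lines in order.
import Mathlib
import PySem

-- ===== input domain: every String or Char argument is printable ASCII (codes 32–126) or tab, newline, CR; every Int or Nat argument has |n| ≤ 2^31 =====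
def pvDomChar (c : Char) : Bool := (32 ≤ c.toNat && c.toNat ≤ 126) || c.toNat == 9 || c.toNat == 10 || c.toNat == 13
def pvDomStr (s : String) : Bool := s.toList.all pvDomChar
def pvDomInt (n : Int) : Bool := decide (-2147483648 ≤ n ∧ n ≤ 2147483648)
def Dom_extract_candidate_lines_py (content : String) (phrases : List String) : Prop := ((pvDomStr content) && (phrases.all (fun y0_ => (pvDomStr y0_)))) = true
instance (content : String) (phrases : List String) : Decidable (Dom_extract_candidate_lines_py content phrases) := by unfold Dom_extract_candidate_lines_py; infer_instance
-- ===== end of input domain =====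

-- B inverts the loop nesting: strip all lines once, mark matching line indices in a set
-- phrase by phrase, then emit the non-empty marked lines in order; same cost class as A.
-- ===== PORT A =====
def extract_candidate_lines_py (content : String) (phrases : List String) : List String :=
  if content = "" ∨ phrases = [] then []
  else
    (PySem.Str.splitlines content).foldl (fun candidates line =>
      let stripped := PySem.Str.strip line
      if stripped = "" then candidates
      else if phrases.any (fun phrase => PySem.Str.isIn phrase stripped) then
        candidates ++ [stripped]
      else candidates) []

-- ===== PORT B =====
def extract_candidate_lines_py_alt (content : String) (phrases : List String) : List String :=
  let lines := (PySem.Str.splitlines content).map PySem.Str.strip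
  let hits : PySem.Set Int := phrases.foldl (fun h phrase =>
    (PySem.List.enumerate lines 0).foldl (fun h p =>
      if PySem.Str.isIn phrase p.2 then PySem.Set.add h p.1 else h) h) PySem.Set.empty
  ((PySem.List.enumerate lines 0).filter
      (fun p => decide (p.2 ≠ "") && PySem.Set.contains hits p.1)).map Prod.snd

-- ===== PRECONDITION & SPEC =====
def Spec_extract_candidate_lines_py (content : String) (phrases : List String) (out : List String) : Prop := out = extract_candidate_lines_py_alt content phrases
instance (content : String) (phrases : List String) (out : List String) : Decidable (Spec_extract_candidate_lines_py content phrases out) := by unfold Spec_extract_candidate_lines_py; infer_instance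

-- ===== CLAIM =====
def Claim_equal_extract_candidate_lines_py : Prop := ∀ (content : String) (phrases : List String), Dom_extract_candidate_lines_py content phrases → Spec_extract_candidate_lines_py content phrases (extract_candidate_lines_py content phrases)

-- ===== LEMMAS AND PROOFS =====

-- membership after the inner (per-phrase) marking pass
lemma pvMem_inner (phrase : String) (l : List (Int × String)) (h0 : PySem.Set Int) (x : Int) :
    x ∈ l.foldl (fun h p => if PySem.Str.isIn phrase p.2 then PySem.Set.add h p.1 else h) h0
      ↔ x ∈ h0 ∨ ∃ p ∈ l, PySem.Str.isIn phrase p.2 ∧ p.1 = x := by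
  induction l generalizing h0 with
  | nil => simp
  | cons q rest ih =>
    rw [List.foldl_cons]
    by_cases hq : PySem.Str.isIn phrase q.2
    · rw [if_pos hq, ih, PySem.Set.mem_add]
      constructor
      · rintro ((h | h) | ⟨p, hp, hi, he⟩)
        · exact Or.inl h
        · exact Or.inr ⟨q, List.mem_cons_self, hq, h.symm⟩
        · exact Or.inr ⟨p, List.mem_cons_of_mem _ hp, hi, he⟩
      · rintro (h | ⟨p, hp, hi, he⟩)
        · exact Or.inl (Or.inl h)
        · rcases List.mem_cons.mp hp with rfl | hp'
          · exact Or.inl (Or.inr he.symm)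
          · exact Or.inr ⟨p, hp', hi, he⟩
    · rw [if_neg hq, ih]
      constructor
      · rintro (h | ⟨p, hp, hi, he⟩)
        · exact Or.inl h
        · exact Or.inr ⟨p, List.mem_cons_of_mem _ hp, hi, he⟩
      · rintro (h | ⟨p, hp, hi, he⟩)
        · exact Or.inl h
        · rcases List.mem_cons.mp hp with rfl | hp'
          · exact absurd hi hq
          · exact Or.inr ⟨p, hp', hi, he⟩

-- membership after the whole marking loop
lemma pvMem_hits (phrases : List String) (l : List (Int × String)) (h0 : PySem.Set Int) (x : Int) :
    x ∈ phrases.foldl (fun h phrase =>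
        l.foldl (fun h p => if PySem.Str.isIn phrase p.2 then PySem.Set.add h p.1 else h) h) h0
      ↔ x ∈ h0 ∨ ∃ phrase ∈ phrases, ∃ p ∈ l, PySem.Str.isIn phrase p.2 ∧ p.1 = x := by
  induction phrases generalizing h0 with
  | nil => simp
  | cons ph rest ih =>
    rw [List.foldl_cons, ih, pvMem_inner]
    constructor
    · rintro ((h | hA) | ⟨p', hp', w⟩)
      · exact Or.inl h
      · exact Or.inr ⟨ph, List.mem_cons_self, hA⟩
      · exact Or.inr ⟨p', List.mem_cons_of_mem _ hp', w⟩
    · rintro (h | ⟨p', hp', w⟩)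
      · exact Or.inl (Or.inl h)
      · rcases List.mem_cons.mp hp' with rfl | hp''
        · exact Or.inl (Or.inr w)
        · exact Or.inr ⟨p', hp'', w⟩

-- projecting a filtered enumeration back to the underlying list
lemma pvFilterEnum (xs : List String) (s : Int) (q : String → Bool) :
    ((PySem.List.enumerate xs s).filter (fun p => q p.2)).map Prod.snd = xs.filter q := by
  induction xs generalizing s with
  | nil => simp [PySem.List.enumerate_nil]
  | cons x rest ih =>
    rw [PySem.List.enumerate_cons]
    by_cases hx : q x
    · simp [hx, ih]
    · simp [hx, ih]

-- A's accumulator loop over the raw lines is a filter of the stripped lines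
lemma pvLoop_eq (phrases : List String) (lines : List String) (acc : List String) :
    lines.foldl (fun candidates line =>
      let stripped := PySem.Str.strip line
      if stripped = "" then candidates
      else if phrases.any (fun phrase => PySem.Str.isIn phrase stripped) then
        candidates ++ [stripped]
      else candidates) acc
    = acc ++ (lines.map PySem.Str.strip).filter
        (fun s => decide (s ≠ "") && phrases.any (fun phrase => PySem.Str.isIn phrase s)) := by
  induction lines generalizing acc with
  | nil => simp
  | cons line rest ih =>
    rw [List.foldl_cons, List.map_cons, List.filter_cons]
    by_cases h0 : PySem.Str.strip line = ""
    · have hb : (decide (PySem.Str.strip line ≠ "") &&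
          phrases.any (fun phrase => PySem.Str.isIn phrase (PySem.Str.strip line))) = false := by
        simp [h0]
      have hstep : (let stripped := PySem.Str.strip line
          if stripped = "" then acc
          else if phrases.any (fun phrase => PySem.Str.isIn phrase stripped) then
            acc ++ [stripped]
          else acc) = acc := by
        simp only [if_pos h0]
      rw [hb, if_neg (Bool.false_ne_true), hstep, ih]
    · by_cases h2 : phrases.any (fun phrase => PySem.Str.isIn phrase (PySem.Str.strip line))
      · have hb : (decide (PySem.Str.strip line ≠ "") &&
            phrases.any (fun phrase => PySem.Str.isIn phrase (PySem.Str.strip line))) = true := by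
          rw [h2]; simp [h0]
        have hstep : (let stripped := PySem.Str.strip line
            if stripped = "" then acc
            else if phrases.any (fun phrase => PySem.Str.isIn phrase stripped) then
              acc ++ [stripped]
            else acc) = acc ++ [PySem.Str.strip line] := by
          simp only [if_neg h0, if_pos h2]
        rw [hb, if_pos rfl, hstep, ih]
        simp
      · have hb : (decide (PySem.Str.strip line ≠ "") &&
            phrases.any (fun phrase => PySem.Str.isIn phrase (PySem.Str.strip line))) = false := by
          simp only [Bool.not_eq_true] at h2
          rw [h2, Bool.and_false]
        have hstep : (let stripped := PySem.Str.strip line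
            if stripped = "" then acc
            else if phrases.any (fun phrase => PySem.Str.isIn phrase stripped) then
              acc ++ [stripped]
            else acc) = acc := by
          simp only [if_neg h0, if_neg h2]
        rw [hb, if_neg (Bool.false_ne_true), hstep, ih]

-- on each enumerated pair, membership in hits is exactly A's any-phrase test
lemma pvPred_eq (phrases : List String) (lines : List String) (p : Int × String)
    (hp : p ∈ PySem.List.enumerate lines 0) :
    PySem.Set.contains
      (phrases.foldl (fun h phrase =>
        (PySem.List.enumerate lines 0).foldl
          (fun h q => if PySem.Str.isIn phrase q.2 then PySem.Set.add h q.1 else h) h)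
        PySem.Set.empty) p.1
    = phrases.any (fun phrase => PySem.Str.isIn phrase p.2) := by
  obtain ⟨k, hk, rfl⟩ := (PySem.List.mem_enumerate_iff _ _ _).mp hp
  rw [Bool.eq_iff_iff, PySem.Set.contains_iff, pvMem_hits]
  simp only [PySem.Set.empty, List.not_mem_nil, false_or, List.any_eq_true]
  constructor
  · rintro ⟨ph, hph, q, hq, hin, hfst⟩
    obtain ⟨k', hk', rfl⟩ := (PySem.List.mem_enumerate_iff _ _ _).mp hq
    have : k' = k := by simpa using hfst
    subst this
    exact ⟨ph, hph, hin⟩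
  · rintro ⟨ph, hph, hin⟩
    exact ⟨ph, hph, _, hp, hin, rfl⟩

-- B's pipeline, written as a filter of the stripped lines
lemma pvAlt_eq (content : String) (phrases : List String) :
    extract_candidate_lines_py_alt content phrases
      = ((PySem.Str.splitlines content).map PySem.Str.strip).filter
          (fun s => decide (s ≠ "") && phrases.any (fun phrase => PySem.Str.isIn phrase s)) := by
  simp only [extract_candidate_lines_py_alt]
  rw [List.filter_congr (fun p hp => by
    rw [pvPred_eq phrases ((PySem.Str.splitlines content).map PySem.Str.strip) p hp])]
  exact pvFilterEnum _ _ (fun s => decide (s ≠ "") && phrases.any (fun phrase => PySem.Str.isIn phrase s))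

-- ===== VERDICT =====
theorem extract_candidate_lines_py_spec : Claim_equal_extract_candidate_lines_py := by
  intro content phrases _
  unfold Spec_extract_candidate_lines_py extract_candidate_lines_py
  rw [pvAlt_eq]
  split_ifs with h
  · rcases h with h | h
    · subst h
      have : PySem.Str.splitlines "" = [] := by decide
      simp [this]
    · subst h
      simp
  · rw [pvLoop_eq, List.nil_append]
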